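-- pv_equiv track=rewrite | github.com/ecstorms/pairwise_stable_networks | modules/hypercube_DAG_majorization_conjecture.py | acyclic_orientation_exists
-- ===== SOURCE A (Python) =====
-- from functools import lru_cache
--
-- def acyclic_orientation_exists(deg):
--     """
--     Performs a depth-first search (DFS) to determine whether there exists
--     a directed acyclic graph (DAG) orientation of the n-dimensional hypercube
--     Q_n with the specified in-degrees.
--
--     Parameters
--     ----------
--     deg : tuple[int]
--         Target in‑degree of every vertex, indexed by its binary label.
--         Its length must be a power of two, say 2ⁿ.
--
--     Returns
--     -------
--     bool
--         True  ⇔  there exists a DAG orientation of Q_n with those in‑degrees.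
--         False ⇔  impossible (all topological orders fail).
--     """
--     m = len(deg)
--     if m == 0 or m & (m - 1):
--         raise ValueError("len(deg) must be 2**n for some n ≥ 1")
--
--     n = m.bit_length() - 1  # dimension
--
--     # quick sanity checks: degree bounds and total edges
--     if any(d < 0 or d > n for d in deg):
--         return False
--     if sum(deg) != n * (m // 2):
--         return False
--
--     # histogram of remaining counts; index = desired in‑degree
--     remaining = [0] * (n + 1)
--     for d in deg:
--         remaining[d] += 1
--     remaining = tuple(remaining)  # make hashable
--
--     # ---------- adjacency lists of Q_n -----------------------------------
--     adj = [[] for _ in range(m)]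
--     for v in range(m):
--         for i in range(n):
--             adj[v].append(v ^ (1 << i))
--
--     # ---------- DFS with memoised states ---------------------------------
--     @lru_cache(maxsize=None)
--     def dfs(mask, rem):  # rem is a tuple like remaining
--         """
--         mask : bitset of already placed vertices in the topological order
--         rem  : tuple of remaining multiplicities for in‑degrees 0 … n
--         """
--         if mask == (1 << m) - 1:  # all 2ⁿ vertices placed
--             return all(x == 0 for x in rem)
--
--         # heuristic: try vertices that create the *fewest* branches first
--         for v in range(m):
--             if mask >> v & 1:  # already placed
--                 continue
--             indeg = sum((mask >> nb) & 1 for nb in adj[v])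
--             if indeg <= n and rem[indeg]:  # still “slots” for this indeg?
--                 new_mask = mask | (1 << v)
--                 new_rem = list(rem)
--                 new_rem[indeg] -= 1
--                 if dfs(new_mask, tuple(new_rem)):
--                     return True
--         return False
--
--     return dfs(0, remaining)
-- ===== SOURCE B (Python) =====
-- def acyclic_orientation_exists(deg):
--     """Bottom-up layered frontier search: expand the SET of reachable
--     (mask, rem) states one placement per layer (no memoised recursion,
--     no adjacency lists: neighbours are computed by bit arithmetic)."""
--     m = len(deg)
--     if not (m > 0 and m & (m - 1) == 0):
--         raise ValueError("len(deg) must be 2**n for some n ≥ 1")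
--     n = m.bit_length() - 1
--
--     if any(d < 0 or d > n for d in deg) or sum(deg) != n * (m // 2):
--         return False
--
--     remaining = tuple(deg.count(i) for i in range(n + 1))
--
--     frontier = {(0, remaining)}
--     for _ in range(m):
--         nxt = set()
--         for mask, rem in frontier:
--             for v in range(m):
--                 if not (mask >> v) & 1:
--                     indeg = sum((mask >> (v ^ (1 << i))) & 1 for i in range(n))
--                     if rem[indeg]:
--                         nxt.add((mask | (1 << v),
--                                  rem[:indeg] + (rem[indeg] - 1,) + rem[indeg + 1:]))
--         frontier = nxt
--
--     return any(all(x == 0 for x in rem) for _, rem in frontier)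
-- ===== Notes on version B (the rewrite author's own statement) =====
-- stated objective: alternative
-- what changed: Replaces A's memoised top-down recursive DFS (with explicit adjacency lists and a fold-built histogram) by a bottom-up layered search that materialises the set of reachable (mask, rem) states one placement per layer, computes neighbour in-degrees by inline bit arithmetic instead of adjacency lists, builds the histogram with count() per degree, and updates rem by tuple slicing; the final layer is tested for an all-zero histogram.
import Mathlib
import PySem

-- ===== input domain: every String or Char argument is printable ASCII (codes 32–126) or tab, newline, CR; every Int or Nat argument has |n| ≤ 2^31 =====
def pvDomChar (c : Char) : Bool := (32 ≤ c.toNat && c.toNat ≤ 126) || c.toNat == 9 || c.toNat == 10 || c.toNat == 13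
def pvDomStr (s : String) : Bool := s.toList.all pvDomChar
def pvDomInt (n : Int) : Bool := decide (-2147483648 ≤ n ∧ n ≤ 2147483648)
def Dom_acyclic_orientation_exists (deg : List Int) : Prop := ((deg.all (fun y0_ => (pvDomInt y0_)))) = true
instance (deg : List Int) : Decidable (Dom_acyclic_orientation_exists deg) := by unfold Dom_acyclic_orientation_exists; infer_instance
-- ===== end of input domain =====

-- B replaces A's memoised recursive DFS by a bottom-up layered search over the set of
-- reachable (mask, rem) states — inline bit arithmetic instead of adjacency lists, a
-- count-built histogram, tuple-slice updates; same return value, similar cost.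


-- ===== PORT A =====
-- A's dfs(mask, rem). lru_cache only caches values; the returned value is the plain recursion.
-- fuel = number of placements still to make (the caller passes m; every recursive call first
-- sets one more bit, so fuel never runs out before mask is full on the reachable states).
def pvA_dfs (m n : Nat) (adj : List (List Nat)) (fuel : Nat) (mask : Nat) (rem : List Int) : Bool :=
  if mask = (1 <<< m) - 1 then rem.all (fun x => x == 0)
  else
    match fuel with
    | 0 => false
    | Nat.succ k =>
      (List.range m).any (fun v =>
        if (mask >>> v) &&& 1 = 1 then false
        else
          let indeg : Nat := ((adj.getD v []).map (fun nb => (mask >>> nb) &&& 1)).sum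
          -- indeg ≤ n always holds (adj[v] has n entries each contributing ≤ 1); rem.getD is
          -- exact for rem[indeg] since indeg ≤ n < rem.length
          if indeg ≤ n ∧ rem.getD indeg 0 ≠ 0 then
            pvA_dfs m n adj k (mask ||| (1 <<< v)) (rem.set indeg (rem.getD indeg 0 - 1))
          else false)

def acyclic_orientation_exists (deg : List Int) : Bool :=
  let m := deg.length
  if m = 0 ∨ m &&& (m - 1) ≠ 0 then false  -- Python raises ValueError here; excluded by Pre_
  else
    let n := PySem.Int.bitLength (m : Int) - 1
    if deg.any (fun d => d < 0 || (n : Int) < d) then false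
    else if deg.sum ≠ (n : Int) * ((m / 2 : Nat) : Int) then false
    else
      -- histogram: every d satisfies 0 ≤ d ≤ n here, so d.toNat is exact and in range
      let remaining := deg.foldl (fun r d => r.set d.toNat (r.getD d.toNat 0 + 1))
        (List.replicate (n + 1) (0 : Int))
      let adj := (List.range m).map (fun v => (List.range n).map (fun i => v ^^^ (1 <<< i)))
      pvA_dfs m n adj m 0 remaining

-- ===== PORT B =====
-- one layer of Source B's search: nxt = set(); for (mask, rem) in frontier: for v in range(m): …
-- rem[indeg] is ported as getD: indeg ≤ n < rem.length holds on every reachable state.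
def pvB_step (m n : Nat) (fr : PySem.Set (Nat × List Int)) : PySem.Set (Nat × List Int) :=
  fr.foldl (fun nxt (st : Nat × List Int) =>
    (List.range m).foldl (fun nxt2 v =>
      if (st.1 >>> v) &&& 1 = 1 then nxt2
      else
        let indeg : Nat := ((List.range n).map (fun i => (st.1 >>> (v ^^^ (1 <<< i))) &&& 1)).sum
        if st.2.getD indeg 0 ≠ 0 then
          PySem.Set.add nxt2 (st.1 ||| (1 <<< v),
            PySem.List.slice st.2 none (some (indeg : Int)) ++
              ([st.2.getD indeg 0 - 1] : List Int) ++
              PySem.List.slice st.2 (some ((indeg : Int) + 1)) none)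
        else nxt2) nxt) PySem.Set.empty

def acyclic_orientation_exists_alt (deg : List Int) : Bool :=
  let m := deg.length
  if ¬(0 < m ∧ m &&& (m - 1) = 0) then false  -- ValueError, same inputs as A; excluded by Pre_
  else
    let n := PySem.Int.bitLength (m : Int) - 1
    if deg.any (fun d => d < 0 || (n : Int) < d)
        || decide (deg.sum ≠ (n : Int) * ((m / 2 : Nat) : Int)) then false
    else
      let remaining := (List.range (n + 1)).map (fun (i : Nat) => (deg.count ((i : Int)) : Int))
      let fr := (List.range m).foldl (fun fr _ => pvB_step m n fr)
        (PySem.Set.ofList [((0 : Nat), remaining)])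
      fr.any (fun st => st.2.all (fun x => x == 0))

-- ===== PRECONDITION & SPEC =====
-- Pre_ excludes exactly the inputs on which A raises ValueError (len(deg) zero or not a
-- power of two); B raises the same ValueError there.
def Pre_acyclic_orientation_exists (deg : List Int) : Prop :=
  deg.length ≠ 0 ∧ deg.length &&& (deg.length - 1) = 0
instance (deg : List Int) : Decidable (Pre_acyclic_orientation_exists deg) := by
  unfold Pre_acyclic_orientation_exists; infer_instance

def pvWitness_acyclic_orientation_exists : List Int := [0, 1]

def Spec_acyclic_orientation_exists (deg : List Int) (out : Bool) : Prop :=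
  out = acyclic_orientation_exists_alt deg
instance (deg : List Int) (out : Bool) : Decidable (Spec_acyclic_orientation_exists deg out) := by
  unfold Spec_acyclic_orientation_exists; infer_instance

-- ===== CLAIM (what is proved, stated in full; the proofs are below) =====
def Claim_equal_acyclic_orientation_exists : Prop :=
  ∀ (deg : List Int), Dom_acyclic_orientation_exists deg →
    Pre_acyclic_orientation_exists deg →
    Spec_acyclic_orientation_exists deg (acyclic_orientation_exists deg)

-- ===== LEMMAS AND PROOFS =====

-- the adjacency lists A builds
def pvAdj (m n : Nat) : List (List Nat) :=
  (List.range m).map (fun v => (List.range n).map (fun i => v ^^^ (1 <<< i)))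

-- number of vertices of range m not yet placed in mask
def pvUnset (m mask : Nat) : Nat := (List.range m).countP (fun v => !(mask.testBit v))

-- the acceptance test both programs run on a final state
def pvAccept (st : Nat × List Int) : Bool := st.2.all (fun x => x == 0)

-- the in-degree both loop bodies compute
def pvIndeg (n mask v : Nat) : Nat :=
  ((List.range n).map (fun i => (mask >>> (v ^^^ (1 <<< i))) &&& 1)).sum

-- B's per-vertex successor (the body of pvB_step's inner loop as an Option)
def pvCand (n mask : Nat) (rem : List Int) (v : Nat) : Option (Nat × List Int) :=
  if (mask >>> v) &&& 1 = 1 then none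
  else if rem.getD (pvIndeg n mask v) 0 ≠ 0 then
    some (mask ||| (1 <<< v),
      PySem.List.slice rem none (some ((pvIndeg n mask v) : Int)) ++
        [rem.getD (pvIndeg n mask v) 0 - 1] ++
        PySem.List.slice rem (some (((pvIndeg n mask v) : Int) + 1)) none)
  else none

-- the same successor with List.set in place of the slice concatenation
def pvCandS (n mask : Nat) (rem : List Int) (v : Nat) : Option (Nat × List Int) :=
  if (mask >>> v) &&& 1 = 1 then none
  else if rem.getD (pvIndeg n mask v) 0 ≠ 0 then
    some (mask ||| (1 <<< v), rem.set (pvIndeg n mask v) (rem.getD (pvIndeg n mask v) 0 - 1))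
  else none

lemma pvBitEq (mask v : Nat) : ((mask >>> v) &&& 1 = 1) ↔ mask.testBit v = true := by
  simp [Nat.testBit_eq_decide_div_mod_eq, Nat.shiftRight_eq_div_pow, Nat.and_one_is_mod]

lemma pvFoldl_const {α β : Type} (f : α → α) (l : List β) (x : α) :
    l.foldl (fun a _ => f a) x = f^[l.length] x := by
  induction l generalizing x with
  | nil => rfl
  | cons a l ih => simp [List.foldl_cons, ih, Function.iterate_succ_apply]

lemma pvIndegB_le (n mask v : Nat) : pvIndeg n mask v ≤ n := by
  rw [pvIndeg]
  calc ((List.range n).map (fun i => (mask >>> (v ^^^ (1 <<< i))) &&& 1)).sum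
      ≤ ((List.range n).map (fun i => (mask >>> (v ^^^ (1 <<< i))) &&& 1)).length • 1 :=
        List.sum_le_card_nsmul _ 1 (by
          intro x hx
          simp only [List.mem_map] at hx
          obtain ⟨a, _, rfl⟩ := hx
          exact Nat.and_le_right)
    _ = n := by simp

lemma pvSlice_set (rem : List Int) (i : Nat) (x : Int) (h : i < rem.length) :
    PySem.List.slice rem none (some (i : Int)) ++ [x] ++
      PySem.List.slice rem (some ((i : Int) + 1)) none = rem.set i x := by
  rw [PySem.List.slice_to_natCast]
  rw [show ((i : Int) + 1) = ((i + 1 : Nat) : Int) by push_cast; ring]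
  rw [PySem.List.slice_from_natCast]
  rw [List.set_eq_take_append_cons_drop, if_pos h]
  simp

lemma pvCand_eq_candS (n mask : Nat) (rem : List Int) (v : Nat)
    (hlen : rem.length = n + 1) : pvCand n mask rem v = pvCandS n mask rem v := by
  unfold pvCand pvCandS
  split_ifs with h1 h2 <;> try rfl
  have hle := pvIndegB_le n mask v
  rw [pvSlice_set _ _ _ (by omega : pvIndeg n mask v < rem.length)]

lemma pvMem_foldl_addOpt {α β : Type} [BEq α] [LawfulBEq α] (g : β → Option α) (l : List β)
    (acc : List α) (x : α) :
    (x ∈ l.foldl (fun a u => (g u).elim a (fun c => PySem.Set.add a c)) acc) ↔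
      x ∈ acc ∨ ∃ u ∈ l, g u = some x := by
  induction l generalizing acc with
  | nil => simp
  | cons a l ih =>
    rw [List.foldl_cons, ih]
    cases hga : g a with
    | none =>
      simp only [Option.elim, List.mem_cons]
      constructor
      · rintro (h | ⟨u, hu, hgu⟩)
        · tauto
        · exact Or.inr ⟨u, Or.inr hu, hgu⟩
      · rintro (h | ⟨u, (rfl | hu), hgu⟩)
        · tauto
        · rw [hga] at hgu; cases hgu
        · exact Or.inr ⟨u, hu, hgu⟩
    | some c =>
      simp only [Option.elim, PySem.Set.mem_add, List.mem_cons]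
      constructor
      · rintro (⟨h | h⟩ | ⟨u, hu, hgu⟩)
        · tauto
        · exact Or.inr ⟨a, Or.inl rfl, by rw [hga, h]⟩
        · exact Or.inr ⟨u, Or.inr hu, hgu⟩
      · rintro (h | ⟨u, (rfl | hu), hgu⟩)
        · tauto
        · rw [hga] at hgu
          exact Or.inl (Or.inr (Option.some.inj hgu).symm)
        · exact Or.inr ⟨u, hu, hgu⟩

lemma pvMem_step (m : Nat) (g : (Nat × List Int) → Nat → Option (Nat × List Int))
    (fr acc : List (Nat × List Int)) (x : Nat × List Int) :
    (x ∈ fr.foldl (fun nxt st =>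
        (List.range m).foldl (fun nxt2 v =>
          (g st v).elim nxt2 (fun c => PySem.Set.add nxt2 c)) nxt) acc) ↔
      x ∈ acc ∨ ∃ st ∈ fr, ∃ v ∈ List.range m, g st v = some x := by
  induction fr generalizing acc with
  | nil => simp
  | cons a fr ih =>
    rw [List.foldl_cons, ih, pvMem_foldl_addOpt (g a)]
    constructor
    · rintro ((h | ⟨v, hv, hc⟩) | ⟨st, hst, v, hv, hc⟩)
      · tauto
      · exact Or.inr ⟨a, List.mem_cons_self, v, hv, hc⟩
      · exact Or.inr ⟨st, List.mem_cons_of_mem _ hst, v, hv, hc⟩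
    · rintro (h | ⟨st, hst, v, hv, hc⟩)
      · tauto
      · rcases List.mem_cons.mp hst with rfl | hst
        · exact Or.inl (Or.inr ⟨v, hv, hc⟩)
        · exact Or.inr ⟨st, hst, v, hv, hc⟩

lemma pvB_step_eq (m n : Nat) (fr : PySem.Set (Nat × List Int)) :
    pvB_step m n fr = fr.foldl (fun nxt st =>
      (List.range m).foldl (fun nxt2 v =>
        (pvCand n st.1 st.2 v).elim nxt2 (fun c => PySem.Set.add nxt2 c)) nxt)
      PySem.Set.empty := by
  unfold pvB_step
  congr 1
  funext nxt st
  congr 1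
  funext nxt2 v
  dsimp only [pvCand, pvIndeg]
  split_ifs <;> rfl

lemma pvCountP_drop {l : List Nat} (hnd : l.Nodup) {v : Nat} (hv : v ∈ l) {p : Nat → Bool}
    (hp : p v = true) : l.countP p = l.countP (fun u => p u && !(u == v)) + 1 := by
  induction l with
  | nil => simp at hv
  | cons a l ih =>
    rcases List.mem_cons.mp hv with rfl | hvl
    · have hnotin : v ∉ l := (List.nodup_cons.mp hnd).1
      have heq : l.countP (fun u => p u && !(u == v)) = l.countP p := by
        apply List.countP_congr
        intro u hu
        have : u ≠ v := fun h => hnotin (h ▸ hu)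
        simp [this]
      rw [List.countP_cons, List.countP_cons, heq]
      simp [hp]
    · have hav : a ≠ v := fun h => (List.nodup_cons.mp hnd).1 (h ▸ hvl)
      rw [List.countP_cons, List.countP_cons, ih (List.nodup_cons.mp hnd).2 hvl]
      have h2 : (!(a == v)) = true := by simp [hav]
      simp only [h2, Bool.and_true]
      omega

lemma pvFull_iff (m mask : Nat) (hlt : mask < 2 ^ m) :
    pvUnset m mask = 0 ↔ mask = (1 <<< m) - 1 := by
  rw [pvUnset, List.countP_eq_zero, Nat.one_shiftLeft]
  constructor
  · intro h
    apply Nat.eq_of_testBit_eq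
    intro i
    rw [Nat.testBit_two_pow_sub_one]
    by_cases hi : i < m
    · have := h i (List.mem_range.mpr hi)
      simp at this
      simp [this, hi]
    · have : mask < 2 ^ i :=
        lt_of_lt_of_le hlt (Nat.pow_le_pow_right (by norm_num) (by omega))
      simp [Nat.testBit_eq_false_of_lt this, hi]
  · rintro rfl v hv
    rw [List.mem_range] at hv
    simp [Nat.testBit_two_pow_sub_one, hv]

lemma pvCandS_inv (m n k : Nat) (mask : Nat) (rem : List Int) (v : Nat) (c : Nat × List Int)
    (hv : v < m) (hc : pvCandS n mask rem v = some c)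
    (hu : pvUnset m mask = k + 1) (hlt : mask < 2 ^ m) (hlen : rem.length = n + 1) :
    pvUnset m c.1 = k ∧ c.1 < 2 ^ m ∧ c.2.length = n + 1 := by
  unfold pvCandS at hc
  by_cases hbit : (mask >>> v) &&& 1 = 1
  · rw [if_pos hbit] at hc; cases hc
  · rw [if_neg hbit] at hc
    by_cases hrem : rem.getD (pvIndeg n mask v) 0 ≠ 0
    · rw [if_pos hrem] at hc
      obtain rfl := Option.some.inj hc
      have htb : mask.testBit v = false := by
        rcases h : mask.testBit v with _ | _
        · rfl
        · exact absurd ((pvBitEq mask v).mpr h) hbit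
      refine ⟨?_, ?_, by simpa using hlen⟩
      · show pvUnset m (mask ||| 1 <<< v) = k
        rw [Nat.one_shiftLeft]
        have hcong : ∀ u, (!(mask ||| 2 ^ v).testBit u) =
            ((fun u => !mask.testBit u) u && !(u == v)) := by
          intro u
          rw [Nat.testBit_or, Nat.testBit_two_pow]
          by_cases huv : u = v
          · subst huv; simp [htb]
          · simp [huv, Ne.symm huv]
        have h1 : pvUnset m (mask ||| 2 ^ v) =
            (List.range m).countP (fun u => (fun u => !mask.testBit u) u && !(u == v)) := by
          rw [pvUnset]
          exact List.countP_congr (fun u _ => by rw [hcong u])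
        have h2 := pvCountP_drop (l := List.range m) (List.nodup_range)
          (List.mem_range.mpr hv) (p := fun u => !mask.testBit u) (by simp [htb])
        rw [pvUnset] at hu
        omega
      · show mask ||| 1 <<< v < 2 ^ m
        rw [Nat.one_shiftLeft]
        exact Nat.or_lt_two_pow hlt (Nat.pow_lt_pow_right (by norm_num) hv)
    · rw [if_neg hrem] at hc; cases hc

lemma pvDfs_unroll (m n k : Nat) (mask : Nat) (rem : List Int)
    (hne : mask ≠ (1 <<< m) - 1) :
    pvA_dfs m n (pvAdj m n) (k + 1) mask rem =
      (List.range m).any (fun v =>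
        (pvCandS n mask rem v).elim false
          (fun c => pvA_dfs m n (pvAdj m n) k c.1 c.2)) := by
  conv_lhs => rw [pvA_dfs]
  rw [if_neg hne]
  apply PySem.List.any_congr_mem
  intro v hv
  have hvm := List.mem_range.mp hv
  have hadj : (pvAdj m n).getD v [] = (List.range n).map (fun i => v ^^^ (1 <<< i)) := by
    rw [pvAdj, PySem.List.getD_map_range _ m v [] hvm]
  have hind := pvIndegB_le n mask v
  by_cases hbit : (mask >>> v) &&& 1 = 1
  · simp [pvCandS, hbit]
  · by_cases hrem : rem.getD (pvIndeg n mask v) 0 ≠ 0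
    · simp only [pvCandS, pvIndeg, if_neg hbit] at hrem ⊢
      simp only [if_pos hrem, hadj, List.map_map, Function.comp_def]
      rw [if_pos (And.intro (by simpa [pvIndeg] using hind) hrem)]
      rfl
    · simp only [pvCandS, pvIndeg, if_neg hbit] at hrem ⊢
      simp only [if_neg hrem, hadj, List.map_map, Function.comp_def]
      rw [if_neg (fun h => hrem h.2)]
      rfl

lemma pvMain (m n k : Nat) (fr : List (Nat × List Int))
    (H : ∀ st ∈ fr, pvUnset m st.1 = k ∧ st.1 < 2 ^ m ∧ st.2.length = n + 1) :
    ((pvB_step m n)^[k] fr).any pvAccept =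
      fr.any (fun st => pvA_dfs m n (pvAdj m n) k st.1 st.2) := by
  induction k generalizing fr with
  | zero =>
    simp only [Function.iterate_zero, id]
    rw [Bool.eq_iff_iff, List.any_eq_true, List.any_eq_true]
    constructor
    · rintro ⟨st, hst, hacc⟩
      refine ⟨st, hst, ?_⟩
      obtain ⟨hu, hlt, _⟩ := H st hst
      have hfull : st.1 = (1 <<< m) - 1 := (pvFull_iff m st.1 hlt).mp hu
      rw [pvA_dfs, if_pos hfull]
      exact hacc
    · rintro ⟨st, hst, h⟩
      obtain ⟨hu, hlt, _⟩ := H st hst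
      have hfull : st.1 = (1 <<< m) - 1 := (pvFull_iff m st.1 hlt).mp hu
      rw [pvA_dfs, if_pos hfull] at h
      exact ⟨st, hst, h⟩
  | succ k ih =>
    rw [Function.iterate_succ_apply]
    have hstep : ∀ x, x ∈ pvB_step m n fr ↔
        ∃ st ∈ fr, ∃ v ∈ List.range m, pvCandS n st.1 st.2 v = some x := by
      intro x
      rw [pvB_step_eq]
      have h0 := pvMem_step m (fun st v => pvCand n st.1 st.2 v) fr PySem.Set.empty x
      constructor
      · intro hx
        rcases h0.mp hx with h | ⟨st, hst, v, hv, hc⟩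
        · simp [PySem.Set.empty] at h
        · exact ⟨st, hst, v, hv, by
            rw [← pvCand_eq_candS n st.1 st.2 v (H st hst).2.2]; exact hc⟩
      · rintro ⟨st, hst, v, hv, hc⟩
        exact h0.mpr (Or.inr ⟨st, hst, v, hv, by
          rw [pvCand_eq_candS n st.1 st.2 v (H st hst).2.2]; exact hc⟩)
    have H' : ∀ st ∈ pvB_step m n fr,
        pvUnset m st.1 = k ∧ st.1 < 2 ^ m ∧ st.2.length = n + 1 := by
      intro st hst
      obtain ⟨st0, hst0, v, hvr, hc⟩ := (hstep st).mp hst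
      obtain ⟨hu0, hlt0, hlen0⟩ := H st0 hst0
      exact pvCandS_inv m n k st0.1 st0.2 v st (List.mem_range.mp hvr) hc hu0 hlt0 hlen0
    rw [ih _ H']
    rw [Bool.eq_iff_iff, List.any_eq_true, List.any_eq_true]
    constructor
    · rintro ⟨x, hx, hdfs⟩
      obtain ⟨st, hst, v, hvr, hc⟩ := (hstep x).mp hx
      refine ⟨st, hst, ?_⟩
      obtain ⟨hu, hlt, _⟩ := H st hst
      have hne : st.1 ≠ (1 <<< m) - 1 := by
        intro h
        have h0 := (pvFull_iff m st.1 hlt).mpr h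
        omega
      rw [pvDfs_unroll m n k st.1 st.2 hne, List.any_eq_true]
      refine ⟨v, hvr, ?_⟩
      rw [hc]
      exact hdfs
    · rintro ⟨st, hst, hdfs⟩
      obtain ⟨hu, hlt, _⟩ := H st hst
      have hne : st.1 ≠ (1 <<< m) - 1 := by
        intro h
        have h0 := (pvFull_iff m st.1 hlt).mpr h
        omega
      rw [pvDfs_unroll m n k st.1 st.2 hne, List.any_eq_true] at hdfs
      obtain ⟨v, hvr, hv⟩ := hdfs
      cases hc : pvCandS n st.1 st.2 v with
      | none => rw [hc] at hv; cases hv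
      | some c =>
        rw [hc] at hv
        exact ⟨c, (hstep c).mpr ⟨st, hst, v, hvr, hc⟩, hv⟩

-- A's fold-histogram equals B's count table, when every degree lies in 0 … n
lemma pvHist (n : Nat) (deg : List Int) (f : Nat → Int)
    (hd : ∀ d ∈ deg, 0 ≤ d ∧ d ≤ (n : Int)) :
    deg.foldl (fun r d => r.set d.toNat (r.getD d.toNat 0 + 1)) ((List.range (n + 1)).map f)
      = (List.range (n + 1)).map (fun (i : Nat) => f i + (deg.count ((i : Int)) : Int)) := by
  induction deg generalizing f with
  | nil => simp
  | cons d t ih =>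
    obtain ⟨hd0, hdn⟩ := hd d List.mem_cons_self
    have hdt : d.toNat < n + 1 := by omega
    rw [List.foldl_cons]
    have hacc : ((List.range (n + 1)).map f).set d.toNat
          (((List.range (n + 1)).map f).getD d.toNat 0 + 1)
        = (List.range (n + 1)).map (fun i => if i = d.toNat then f i + 1 else f i) := by
      rw [PySem.List.getD_map_range _ (n + 1) d.toNat 0 hdt]
      apply List.ext_getElem (by simp)
      intro i h1 h2
      simp only [List.getElem_set, List.getElem_map, List.getElem_range]
      by_cases hi : i = d.toNat
      · simp [hi]
      · simp [hi, Ne.symm hi]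
    rw [hacc, ih _ (fun x hx => hd x (List.mem_cons_of_mem _ hx))]
    apply List.map_congr_left
    intro i hi
    rw [List.count_cons]
    by_cases hie : i = d.toNat
    · have hdi : d = (i : Int) := by omega
      rw [if_pos hie, hdi, beq_self_eq_true, if_pos rfl]
      push_cast
      ring
    · have hdi : (d == (i : Int)) = false := by
        rw [beq_eq_false_iff_ne]
        intro h
        omega
      rw [if_neg hie, hdi, if_neg (by simp : ¬(false = true))]
      simp

-- ===== VERDICT (by name: the statement is the Claim_ definition above) =====
theorem acyclic_orientation_exists_spec : Claim_equal_acyclic_orientation_exists := by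
  intro deg hdom hpre
  obtain ⟨h1, h2⟩ := hpre
  unfold Spec_acyclic_orientation_exists
  simp only [acyclic_orientation_exists, acyclic_orientation_exists_alt]
  rw [if_neg (not_or.mpr ⟨h1, not_not_intro h2⟩ :
    ¬(deg.length = 0 ∨ deg.length &&& (deg.length - 1) ≠ 0))]
  rw [if_neg (not_not_intro ⟨Nat.pos_of_ne_zero h1, h2⟩ :
    ¬¬(0 < deg.length ∧ deg.length &&& (deg.length - 1) = 0))]
  set n := PySem.Int.bitLength (deg.length : Int) - 1 with hn
  cases hany : deg.any (fun d => d < 0 || (n : Int) < d) with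
  | true => simp
  | false =>
    rw [if_neg (by simp : ¬(false = true)), Bool.false_or]
    by_cases hsum : deg.sum ≠ (n : Int) * ((deg.length / 2 : Nat) : Int)
    · rw [if_pos hsum, if_pos (decide_eq_true hsum)]
    · rw [if_neg hsum, if_neg (by simpa using hsum)]
      have hbnd : ∀ d ∈ deg, 0 ≤ d ∧ d ≤ (n : Int) := by
        intro d hdm
        have := List.any_eq_false.mp hany d hdm
        simp at this
        exact ⟨this.1, this.2⟩
      have hrepl : List.replicate (n + 1) (0 : Int)
          = (List.range (n + 1)).map (fun _ => 0) := by
        simp [List.map_const']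
      have hrem : deg.foldl (fun r d => r.set d.toNat (r.getD d.toNat 0 + 1))
            (List.replicate (n + 1) (0 : Int))
          = (List.range (n + 1)).map (fun (i : Nat) => (deg.count ((i : Int)) : Int)) := by
        rw [hrepl, pvHist n deg _ hbnd]
        simp
      rw [hrem]
      have hadj : (List.range deg.length).map (fun v =>
          (List.range n).map (fun i => v ^^^ (1 <<< i))) = pvAdj deg.length n := rfl
      rw [hadj, pvFoldl_const, List.length_range,
        show (fun st : Nat × List Int => st.2.all (fun x => x == 0)) = pvAccept from rfl]
      have hinit : ∀ st ∈ [((0 : Nat),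
          (List.range (n + 1)).map (fun (i : Nat) => (deg.count ((i : Int)) : Int)))],
          pvUnset deg.length st.1 = deg.length ∧ st.1 < 2 ^ deg.length ∧
            st.2.length = n + 1 := by
        intro st hst
        rw [List.mem_singleton] at hst
        subst hst
        refine ⟨?_, Nat.two_pow_pos deg.length, by simp⟩
        rw [pvUnset]
        rw [List.countP_eq_length.mpr (by intro u hu; simp [Nat.zero_testBit])]
        exact List.length_range
      have hmain := pvMain deg.length n deg.length _ hinit
      rw [show PySem.Set.ofList [((0 : Nat),
          (List.range (n + 1)).map (fun (i : Nat) => (deg.count ((i : Int)) : Int)))] =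
          [((0 : Nat), (List.range (n + 1)).map (fun (i : Nat) => (deg.count ((i : Int)) : Int)))]
        from rfl]
      rw [hmain]
      simp
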